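-- pv_equiv track=rewrite | github.com/songjayhyun/Algorithm | 백준/Gold/2179. 비슷한 단어/비슷한 단어.py | find_similar_words
-- ===== SOURCE A (Python) =====
-- def find_similar_words(words):
--     max_length = 0
--     similar_pair = ('', '')
--
--     prefix_map = {}
--
--     for word in words:
--         current_prefix = ''
--         for letter in word:
--             current_prefix += letter
--             if current_prefix in prefix_map:
--                 prefix_map[current_prefix].append(word)
--             else:
--                 prefix_map[current_prefix] = [word]
--
--     for word in words:
--         current_prefix = ''
--         for letter in word:
--             current_prefix += letter
--             if len(prefix_map[current_prefix]) > 1: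
--                 length = len(current_prefix)
--                 if length > max_length:
--                     max_length = length
--                     similar_pair = (word, prefix_map[current_prefix][1])
--
--     return similar_pair
-- ===== SOURCE B (Python) =====
-- def find_similar_words(words):
--     # Sort-then-adjacent-scan: the longest prefix shared by two words (duplicates
--     # included) is always realised by some neighbouring pair in sorted order, so
--     # one pass over the sorted list finds the maximal shared length m; then the
--     # answer pair is rebuilt from the first word (input order) whose m-prefix is
--     # shared, paired with the second word carrying that prefix.
--     order = sorted(words)
--     m = 0
--     for a, b in zip(order, order[1:]):
--         k = 0
--         while k < len(a) and k < len(b) and a[k] == b[k]: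
--             k += 1
--         if k > m:
--             m = k
--     if m == 0:
--         return ('', '')
--     for w in words:
--         if len(w) >= m:
--             mates = [x for x in words if x[:m] == w[:m]]
--             if len(mates) >= 2:
--                 return (w, mates[1])
--     return ('', '')
-- ===== Notes on version B (the rewrite author's own statement) =====
-- stated objective: alternative
-- what changed: Replaces A's prefix dictionary and full prefix rescan with a sort-then-adjacent-scan: sort the words, take the maximum longest-common-prefix length m over neighbouring sorted pairs (correct because the deepest shared prefix is always realised by some sorted neighbours), then rebuild A's exact pair by finding the first word in input order whose m-prefix occurs twice.
import Mathlib
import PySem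

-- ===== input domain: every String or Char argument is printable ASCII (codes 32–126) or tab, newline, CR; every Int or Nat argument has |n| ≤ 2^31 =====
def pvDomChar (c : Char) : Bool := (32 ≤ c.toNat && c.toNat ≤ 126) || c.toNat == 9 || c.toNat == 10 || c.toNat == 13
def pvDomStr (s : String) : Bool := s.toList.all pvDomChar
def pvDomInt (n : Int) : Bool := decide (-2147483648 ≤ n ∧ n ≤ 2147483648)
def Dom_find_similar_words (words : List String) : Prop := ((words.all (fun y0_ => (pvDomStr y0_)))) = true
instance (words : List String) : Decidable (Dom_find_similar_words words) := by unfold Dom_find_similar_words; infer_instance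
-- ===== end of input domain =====

-- B replaces A's prefix dictionary and full prefix rescan with sort-then-adjacent-scan
-- (the deepest shared prefix is realised by some sorted neighbours); same returned value.
-- Prefix keys are kept as List Char (a Python str is exactly its list of characters).

-- ===== PORT A =====
-- inner loop of A's first pass: current_prefix += letter; append word to prefix_map[current_prefix]
def pvStepA1 (w : String) (acc : List Char × PySem.Dict (List Char) (List String)) (letter : Char) :
    List Char × PySem.Dict (List Char) (List String) :=
  let cur := acc.1 ++ [letter]
  (cur, if acc.2.contains cur then acc.2.modify cur [] (fun l => l ++ [w]) else acc.2.insert cur [w])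

-- inner loop of A's second pass (prefix_map[current_prefix] is always present: getD [];
-- prefix_map[current_prefix][1] is in range because len > 1: pyGet? + getD "")
def pvStepA2 (pm : PySem.Dict (List Char) (List String)) (w : String)
    (acc : List Char × (Int × (String × String))) (letter : Char) :
    List Char × (Int × (String × String)) :=
  let cur := acc.1 ++ [letter]
  let st := acc.2
  if (pm.getD cur []).length > 1 then
    let length : Int := cur.length
    if length > st.1 then (cur, (length, (w, (PySem.List.pyGet? (pm.getD cur []) 1).getD "")))
    else (cur, st)
  else (cur, st)

def find_similar_words (words : List String) : String × String :=
  let prefix_map : PySem.Dict (List Char) (List String) :=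
    words.foldl (fun d w => (w.toList.foldl (pvStepA1 w) ([], d)).2) PySem.Dict.empty
  (words.foldl (fun st w => (w.toList.foldl (pvStepA2 prefix_map w) ([], st)).2)
    ((0 : Int), ("", ""))).2

-- ===== PORT B =====
-- port of Source B's while loop: k advances while both words extend and the k-th chars match;
-- the structural recursion produces the same successive k values
def pvLcp : List Char → List Char → Nat
  | a :: x, b :: y => if a = b then pvLcp x y + 1 else 0
  | _, _ => 0

-- port of Source B's second loop: first word (input order) with len(w) >= m whose m-prefix
-- occurs at least twice; mates[1] is in range because len(mates) >= 2: pyGet? + getD ""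
def pvFind (ws : List String) (m : Nat) : List String → String × String
  | [] => ("", "")
  | w :: rest =>
    if m ≤ w.toList.length then
      let mates := ws.filter (fun x =>
        PySem.List.slice x.toList none (some (m : Int)) = PySem.List.slice w.toList none (some (m : Int)))
      if 2 ≤ mates.length then (w, (PySem.List.pyGet? mates 1).getD "")
      else pvFind ws m rest
    else pvFind ws m rest

def find_similar_words_alt (words : List String) : String × String :=
  let order := PySem.List.sorted words (fun x => x) false
  let pairs := order.zip (PySem.List.slice order (some 1) none)
  let m := pairs.foldl (fun m ab =>
    let k := pvLcp ab.1.toList ab.2.toList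
    if k > m then k else m) 0
  if m = 0 then ("", "") else pvFind words m words

-- ===== PRECONDITION & SPEC =====
def Spec_find_similar_words (words : List String) (out : String × String) : Prop := out = find_similar_words_alt words
instance (words : List String) (out : String × String) : Decidable (Spec_find_similar_words words out) := by unfold Spec_find_similar_words; infer_instance

-- ===== CLAIM (what is proved, stated in full; the proofs are below) =====
def Claim_equal_find_similar_words : Prop := ∀ (words : List String), Dom_find_similar_words words → Spec_find_similar_words words (find_similar_words words)

-- ===== LEMMAS AND PROOFS =====

-- abstract model: the words having nonempty prefix p, in input order
def pvOcc (ws : List String) (p : List Char) : List String := ws.filter (fun w => p.isPrefixOf w.toList)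
def pvSec (ws : List String) (p : List Char) : String := (PySem.List.pyGet? (pvOcc ws p) 1).getD ""
def pvK (ws : List String) (w : String) (n : Nat) : Nat :=
  Nat.findGreatest (fun L => 1 < (pvOcc ws (w.toList.take L)).length) n
def pvF (ws : List String) (st : Int × (String × String)) (w : String) (n : Nat) : Int × (String × String) :=
  if st.1 < (pvK ws w n : Int) then ((pvK ws w n : Int), (w, pvSec ws (w.toList.take (pvK ws w n)))) else st
def pvGO (ws : List String) (w : String) (st : Int × (String × String)) (k : Nat) : Int × (String × String) :=
  if 1 < (pvOcc ws (w.toList.take (k+1))).length then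
    (if ((w.toList.take (k+1)).length : Int) > st.1 then
      (((w.toList.take (k+1)).length : Int), (w, pvSec ws (w.toList.take (k+1)))) else st) else st
def pvBuildA (ws : List String) : PySem.Dict (List Char) (List String) :=
  ws.foldl (fun d w => (w.toList.foldl (pvStepA1 w) ([], d)).2) PySem.Dict.empty
-- the global maximum shared-prefix depth
def pvM (ws : List String) : Nat := (ws.map (fun w => pvK ws w w.toList.length)).foldl max 0

-- take-k characterization of nonempty prefixes
lemma pv_take_iff (l p : List Char) (hp : p ≠ []) :
    (∃ k, k < l.length ∧ p = l.take (k+1)) ↔ p <+: l := by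
  constructor
  · rintro ⟨k, _, rfl⟩; exact List.take_prefix _ _
  · intro h
    have hlen : 0 < p.length := List.length_pos_iff.mpr hp
    have hle : p.length ≤ l.length := h.length_le
    refine ⟨p.length - 1, by omega, ?_⟩
    rw [show p.length - 1 + 1 = p.length by omega]
    exact List.prefix_iff_eq_take.mp h

-- one step of A's first pass, seen through getD
lemma pv_stepA1_getD (d : PySem.Dict (List Char) (List String)) (cur : List Char) (w : String)
    (p : List Char) :
    ((if d.contains cur then d.modify cur [] (fun l => l ++ [w]) else d.insert cur [w]).getD p [])
      = if p = cur then d.getD p [] ++ [w] else d.getD p [] := by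
  by_cases hc : d.contains cur
  · simp only [hc, if_true]
    rw [PySem.Dict.getD_modify]
    by_cases hpc : p = cur
    · subst hpc; simp
    · simp [hpc]
  · simp only [hc]
    rw [if_neg (by simp), PySem.Dict.getD_insert]
    by_cases hpc : p = cur
    · subst hpc
      rw [PySem.Dict.getD_of_not_contains (h := by simpa using hc)]
      simp
    · simp [hpc]

-- A's inner first-pass loop appends w to every extension of s by a nonempty prefix of cs
lemma pv_innerA1 (w : String) (cs : List Char) : ∀ (s : List Char)
    (d : PySem.Dict (List Char) (List String)) (p : List Char),
    ((cs.foldl (pvStepA1 w) (s, d)).2).getD p []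
      = d.getD p [] ++ (if ∃ k, k < cs.length ∧ p = s ++ cs.take (k+1) then [w] else []) := by
  induction cs with
  | nil => intro s d p; simp
  | cons c cs ih =>
    intro s d p
    simp only [List.foldl_cons]
    rw [show pvStepA1 w (s, d) c
        = (s ++ [c], if d.contains (s ++ [c]) then d.modify (s ++ [c]) [] (fun l => l ++ [w])
            else d.insert (s ++ [c]) [w]) from rfl]
    rw [ih, pv_stepA1_getD]
    by_cases h1 : p = s ++ [c]
    · have h2 : ¬ ∃ k, k < cs.length ∧ p = (s ++ [c]) ++ cs.take (k+1) := by
        rintro ⟨k, hk, hp⟩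
        have := congrArg List.length hp
        have h1l := congrArg List.length h1
        simp [List.length_take] at this h1l
        omega
      have h3 : ∃ k, k < (c :: cs).length ∧ p = s ++ (c :: cs).take (k+1) := ⟨0, by simp, by simpa using h1⟩
      rw [if_pos h1, if_neg h2, if_pos h3]
      simp
    · have h4 : (∃ k, k < cs.length ∧ p = (s ++ [c]) ++ cs.take (k+1))
          ↔ (∃ k, k < (c :: cs).length ∧ p = s ++ (c :: cs).take (k+1)) := by
        constructor
        · rintro ⟨k, hk, rfl⟩
          exact ⟨k + 1, by simpa using hk, by simp⟩
        · rintro ⟨k, hk, rfl⟩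
          match k with
          | 0 => exact absurd (show (s ++ List.take (0+1) (c :: cs)) = s ++ [c] by simp) h1
          | k + 1 => exact ⟨k, by simpa using hk, by simp⟩
      simp only [h1, if_false, h4]

-- A's prefix_map, abstractly
lemma pv_buildA (ws : List String) (p : List Char) (hp : p ≠ []) :
    (pvBuildA ws).getD p [] = pvOcc ws p := by
  induction ws using List.reverseRecOn with
  | nil => simp [pvBuildA, pvOcc]
  | append_singleton ws w ih =>
    rw [show pvBuildA (ws ++ [w]) = (w.toList.foldl (pvStepA1 w) ([], pvBuildA ws)).2 by
      simp [pvBuildA, List.foldl_append]]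
    rw [pv_innerA1, ih]
    have hcond : (∃ k, k < w.toList.length ∧ p = [] ++ w.toList.take (k+1))
        ↔ p.isPrefixOf w.toList = true := by
      simpa using (pv_take_iff w.toList p hp).trans (List.isPrefixOf_iff_prefix).symm
    unfold pvOcc
    rw [List.filter_append]
    congr 1
    by_cases hc : p.isPrefixOf w.toList = true
    · rw [if_pos (hcond.mpr hc)]; simp [hc]
    · rw [if_neg (fun h => hc (hcond.mp h))]
      simp only [Bool.not_eq_true] at hc
      simp [hc]

-- A's second-pass char fold, reindexed over positions
def pvA2 (pm : PySem.Dict (List Char) (List String)) (w : String) (p : List Char)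
    (st : Int × (String × String)) : Int × (String × String) :=
  if 1 < (pm.getD p []).length then
    (if ((p.length : Int) > st.1) then
      ((p.length : Int), (w, (PySem.List.pyGet? (pm.getD p []) 1).getD "")) else st)
  else st

lemma pv_stepA2_eq (pm : PySem.Dict (List Char) (List String)) (w : String) (s : List Char)
    (st : Int × (String × String)) (c : Char) :
    pvStepA2 pm w (s, st) c = (s ++ [c], pvA2 pm w (s ++ [c]) st) := by
  simp only [pvStepA2, pvA2]
  split_ifs <;> rfl

lemma pv_foldA2 (pm : PySem.Dict (List Char) (List String)) (w : String) (cs : List Char) :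
    ∀ (s : List Char) (st : Int × (String × String)),
    ((cs.foldl (pvStepA2 pm w) (s, st)).2)
      = (List.range cs.length).foldl (fun st k => pvA2 pm w (s ++ cs.take (k+1)) st) st := by
  induction cs with
  | nil => intro s st; simp
  | cons c cs ih =>
    intro s st
    rw [List.foldl_cons, pv_stepA2_eq, ih]
    rw [List.length_cons, List.range_succ_eq_map, List.foldl_cons, List.foldl_map]
    have h0 : s ++ (c :: cs).take (0+1) = s ++ [c] := by simp
    rw [h0]
    congr 1
    funext st' k
    have : s ++ (c :: cs).take (k+1+1) = (s ++ [c]) ++ cs.take (k+1) := by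
      simp [List.take_succ_cons]
    rw [this]

-- the reindexed fold with the abstract map
lemma pv_foldA2_occ (ws : List String) (w : String) (m : Nat) (hm : m ≤ w.toList.length) :
    ∀ (st : Int × (String × String)),
    (List.range m).foldl (fun st k => pvA2 (pvBuildA ws) w ([] ++ w.toList.take (k+1)) st) st
      = (List.range m).foldl (pvGO ws w) st := by
  induction m with
  | zero => intro st; simp
  | succ m ih =>
    intro st
    simp only [List.range_succ, List.foldl_append, List.foldl_cons, List.foldl_nil]
    rw [ih (Nat.le_of_succ_le hm)]
    have hp : w.toList.take (m+1) ≠ [] := by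
      have : (w.toList.take (m+1)).length = m+1 := by
        rw [List.length_take]; omega
      intro h; rw [h] at this; simp at this
    unfold pvA2 pvGO pvSec
    rw [List.nil_append, pv_buildA ws _ hp]

-- the abstract ascending fold computes the greatest shared prefix update
lemma pv_ascend (ws : List String) (w : String) (m : Nat) (hm : m ≤ w.toList.length) :
    ∀ (st : Int × (String × String)), 0 ≤ st.1 →
    (List.range m).foldl (pvGO ws w) st = pvF ws st w m := by
  induction m with
  | zero =>
    intro st hst
    simp only [List.range_zero, List.foldl_nil, pvF, pvK, Nat.findGreatest_zero]
    rw [if_neg (by push_cast; omega)]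
  | succ m ih =>
    intro st hst
    simp only [List.range_succ, List.foldl_append, List.foldl_cons, List.foldl_nil]
    rw [ih (Nat.le_of_succ_le hm) st hst]
    have hKle : pvK ws w m ≤ m := by unfold pvK; exact Nat.findGreatest_le m
    have hlen : (w.toList.take (m+1)).length = m + 1 := by rw [List.length_take]; omega
    by_cases hP : 1 < (pvOcc ws (w.toList.take (m+1))).length
    · have hK1 : pvK ws w (m+1) = m+1 := by
        unfold pvK; rw [Nat.findGreatest_succ, if_pos hP]
      by_cases h1 : st.1 < (pvK ws w m : Int)
      · have hS : pvF ws st w m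
            = ((pvK ws w m : Int), (w, pvSec ws (w.toList.take (pvK ws w m)))) := by
          unfold pvF; rw [if_pos h1]
        rw [hS]
        unfold pvGO pvF
        rw [if_pos hP, hK1]
        simp only [hlen]
        rw [if_pos (by push_cast; omega), if_pos (by push_cast; omega)]
      · have hS : pvF ws st w m = st := by unfold pvF; rw [if_neg h1]
        rw [hS]
        unfold pvGO pvF
        rw [if_pos hP, hK1]
        simp only [hlen]
    · have hK1 : pvK ws w (m+1) = pvK ws w m := by
        unfold pvK; rw [Nat.findGreatest_succ, if_neg hP]
      unfold pvGO
      rw [if_neg hP]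
      unfold pvF
      rw [hK1]

lemma pv_F_nonneg (ws : List String) (st : Int × (String × String)) (w : String) (n : Nat)
    (hst : 0 ≤ st.1) : 0 ≤ (pvF ws st w n).1 := by
  unfold pvF
  split
  · positivity
  · exact hst

-- A's outer second-pass loop is the fold of pvF
lemma pv_outerA (ws ws' : List String) :
    ∀ (st : Int × (String × String)), 0 ≤ st.1 →
    ws'.foldl (fun st w => (w.toList.foldl (pvStepA2 (pvBuildA ws) w) ([], st)).2) st
      = ws'.foldl (fun st w => pvF ws st w w.toList.length) st := by
  induction ws' with
  | nil => intro st _; rfl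
  | cons w ws' ih =>
    intro st hst
    rw [List.foldl_cons, List.foldl_cons]
    rw [pv_foldA2, pv_foldA2_occ ws w w.toList.length le_rfl,
      pv_ascend ws w w.toList.length le_rfl st hst]
    exact ih _ (pv_F_nonneg ws st w w.toList.length hst)

-- pvK basic facts
lemma pv_K_le (ws : List String) (w : String) (n : Nat) : pvK ws w n ≤ n :=
  Nat.findGreatest_le n

lemma pv_K_spec (ws : List String) (w : String) (n : Nat) (h : 0 < pvK ws w n) :
    1 < (pvOcc ws (w.toList.take (pvK ws w n))).length := by
  unfold pvK at h ⊢
  have h2 := (Nat.findGreatest_eq_iff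
    (P := fun L => 1 < (pvOcc ws (w.toList.take L)).length) (k := n)
    (m := Nat.findGreatest (fun L => 1 < (pvOcc ws (w.toList.take L)).length) n)).mp rfl
  exact h2.2.1 (by omega)

lemma pv_le_K (ws : List String) (w : String) (n L : Nat) (hL : L ≤ n)
    (h : 1 < (pvOcc ws (w.toList.take L)).length) : L ≤ pvK ws w n :=
  Nat.le_findGreatest hL h

-- pvM basic facts
lemma pv_K_le_M (ws : List String) (w : String) (hw : w ∈ ws) :
    pvK ws w w.toList.length ≤ pvM ws :=
  (PySem.List.le_foldl_max ((ws.map (fun w => pvK ws w w.toList.length))) 0).2 _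
    (List.mem_map_of_mem hw)

lemma pv_foldl_max_cases : ∀ (l : List Nat) (a : Nat), l.foldl max a = a ∨ l.foldl max a ∈ l := by
  intro l
  induction l with
  | nil => intro a; left; rfl
  | cons x t ih =>
    intro a
    rw [List.foldl_cons]
    rcases ih (max a x) with h | h
    · rcases max_choice a x with hm | hm
      · left; rw [h, hm]
      · right; rw [h, hm]; exact List.mem_cons_self
    · right; exact List.mem_cons_of_mem _ h

lemma pv_M_mem (ws : List String) (h : pvM ws ≠ 0) :
    ∃ w ∈ ws, pvK ws w w.toList.length = pvM ws := by
  rcases pv_foldl_max_cases (ws.map (fun w => pvK ws w w.toList.length)) 0 with h0 | h0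
  · exact absurd h0 h
  · rcases List.mem_map.mp h0 with ⟨w, hw, he⟩
    exact ⟨w, hw, he⟩

lemma pv_foldl_max_le : ∀ (l : List Nat) (a b : Nat), a ≤ b → (∀ y ∈ l, y ≤ b) →
    l.foldl max a ≤ b := by
  intro l
  induction l with
  | nil => intro a b ha _; exact ha
  | cons x t ih =>
    intro a b ha hy
    rw [List.foldl_cons]
    exact ih _ _ (max_le ha (hy x List.mem_cons_self)) (fun y h => hy y (List.mem_cons_of_mem _ h))

-- lcp facts
lemma pv_lcp_le_left : ∀ (x y : List Char), pvLcp x y ≤ x.length := by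
  intro x
  induction x with
  | nil => intro y; cases y <;> simp [pvLcp]
  | cons a x ih =>
    intro y
    cases y with
    | nil => simp [pvLcp]
    | cons b y =>
      simp only [pvLcp]
      split
      · simpa using ih y
      · simp

lemma pv_lcp_take_eq : ∀ (x y : List Char), x.take (pvLcp x y) = y.take (pvLcp x y) := by
  intro x
  induction x with
  | nil => intro y; cases y <;> simp [pvLcp]
  | cons a x ih =>
    intro y
    cases y with
    | nil => simp [pvLcp]
    | cons b y =>
      simp only [pvLcp]
      split
      · rename_i h; simp [List.take_succ_cons, h, ih y]
      · simp

lemma pv_lcp_ge : ∀ (p x y : List Char), p <+: x → p <+: y → p.length ≤ pvLcp x y := by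
  intro p
  induction p with
  | nil => intro x y _ _; simp
  | cons c p ih =>
    intro x y hx hy
    cases x with
    | nil => exact absurd hx (by simp)
    | cons a x =>
      cases y with
      | nil => exact absurd hy (by simp)
      | cons b y =>
        obtain ⟨rfl, hx'⟩ := List.cons_prefix_cons.mp hx
        obtain ⟨rfl, hy'⟩ := List.cons_prefix_cons.mp hy
        simp only [pvLcp, List.length_cons]
        exact Nat.succ_le_succ (ih x y hx' hy')

-- cons ≤ cons on lists of characters splits into head-lt or head-eq-and-tail-le
lemma pv_cons_le (a b : Char) (l m : List Char) (h : a :: l ≤ b :: m) :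
    a < b ∨ (a = b ∧ l ≤ m) := by
  rcases lt_or_eq_of_le h with h1 | h1
  · rw [List.cons_lt_cons_iff] at h1
    rcases h1 with h2 | ⟨rfl, h2⟩
    · exact Or.inl h2
    · exact Or.inr ⟨rfl, le_of_lt h2⟩
  · injection h1 with h1 h2
    exact Or.inr ⟨h1, le_of_eq h2⟩

-- a prefix shared by two lexicographic bounds is a prefix of everything between them
lemma pv_lex_sandwich : ∀ (p x y z : List Char), x ≤ y → y ≤ z → p <+: x → p <+: z → p <+: y := by
  intro p
  induction p with
  | nil => intro x y z _ _ _ _; simp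
  | cons c p ih =>
    intro x y z hxy hyz hpx hpz
    cases x with
    | nil => exact absurd hpx (by simp)
    | cons a x =>
      cases z with
      | nil => exact absurd hpz (by simp)
      | cons d z =>
        obtain ⟨rfl, hpx'⟩ := List.cons_prefix_cons.mp hpx
        obtain ⟨rfl, hpz'⟩ := List.cons_prefix_cons.mp hpz
        cases y with
        | nil =>
          exact absurd (lt_of_le_of_lt hxy (List.nil_lt_cons _ _)) (lt_irrefl _)
        | cons b y =>
          rcases pv_cons_le c b x y hxy with h1 | ⟨rfl, h1⟩
          · rcases pv_cons_le b c y z hyz with h2 | ⟨rfl, h2⟩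
            · exact absurd (lt_trans h1 h2) (lt_irrefl _)
            · exact absurd h1 (lt_irrefl _)
          · rcases pv_cons_le c c y z hyz with h2 | ⟨_, h2⟩
            · exact absurd h2 (lt_irrefl _)
            · exact List.cons_prefix_cons.mpr ⟨rfl, ih x y z h1 h2 hpx' hpz'⟩

-- an adjacent pair satisfying q forces at least two elements of the filter
lemma pv_two_le_filter (q : String → Bool) : ∀ (l : List String),
    (∃ ab ∈ l.zip l.tail, q ab.1 = true ∧ q ab.2 = true) → 2 ≤ (l.filter q).length := by
  intro l
  induction l with
  | nil => rintro ⟨ab, h, _⟩; simp at h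
  | cons a t ih =>
    rintro ⟨ab, hab, hq1, hq2⟩
    cases t with
    | nil => simp at hab
    | cons b t' =>
      rcases List.mem_cons.mp hab with rfl | hab'
      · have : (a :: b :: t').filter q = a :: b :: t'.filter q := by
          simp [hq1, hq2]
        rw [this]; simp
      · have h2 := ih ⟨ab, hab', hq1, hq2⟩
        rw [List.filter_cons]
        split
        · simp only [List.length_cons]; omega
        · exact h2

-- conversely, with a sorted list and a convex predicate, two filter hits give adjacent hits
lemma pv_adj_of_two_le_filter (q : String → Bool)
    (hconv : ∀ x y z : String, x ≤ y → y ≤ z → q x = true → q z = true → q y = true) :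
    ∀ (l : List String), l.Pairwise (· ≤ ·) → 2 ≤ (l.filter q).length →
    ∃ ab ∈ l.zip l.tail, q ab.1 = true ∧ q ab.2 = true := by
  intro l
  induction l with
  | nil => intro _ h; simp at h
  | cons a t ih =>
    intro hpw hlen
    have ha : ∀ y ∈ t, a ≤ y := (List.pairwise_cons.mp hpw).1
    have ht : t.Pairwise (· ≤ ·) := (List.pairwise_cons.mp hpw).2
    by_cases hqa : q a = true
    · have h1 : 1 ≤ (t.filter q).length := by
        rw [List.filter_cons, if_pos hqa] at hlen
        simpa using Nat.le_of_succ_le_succ hlen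
      obtain ⟨y, hy⟩ := List.exists_mem_of_length_pos h1
      have hyt : y ∈ t := (List.mem_filter.mp hy).1
      have hqy : q y = true := (List.mem_filter.mp hy).2
      cases t with
      | nil => simp at hyt
      | cons b t' =>
        have hqb : q b = true := by
          rcases List.mem_cons.mp hyt with rfl | hyt'
          · exact hqy
          · exact hconv a b y (ha b List.mem_cons_self)
              ((List.pairwise_cons.mp ht).1 y hyt') hqa hqy
        exact ⟨(a, b), by simp, hqa, hqb⟩
    · have hqa' : q a = false := by simpa using hqa
      rw [List.filter_cons, if_neg (by simp [hqa'])] at hlen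
      obtain ⟨ab, hab, hq⟩ := ih ht hlen
      cases t with
      | nil => simp at hab
      | cons b t' =>
        exact ⟨ab, List.mem_cons_of_mem _ hab, hq⟩

-- occurrence counts transfer along the sort permutation
lemma pv_occ_sorted (ws : List String) (p : List Char) :
    (pvOcc ws p).length
      = ((PySem.List.sorted ws (fun x => x) false).filter (fun w => p.isPrefixOf w.toList)).length :=
  (List.Perm.length_eq ((PySem.List.sorted_perm ws (fun x => x) false).filter _)).symm

-- B's m (max adjacent lcp over the sorted list) IS the global maximum shared depth
lemma pv_mB_eq (ws : List String) :
    (((PySem.List.sorted ws (fun x => x) false).zip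
        (PySem.List.sorted ws (fun x => x) false).tail).foldl (fun m ab =>
      let k := pvLcp ab.1.toList ab.2.toList
      if k > m then k else m) 0) = pvM ws := by
  have hstep : (fun (m : Nat) (ab : String × String) =>
      let k := pvLcp ab.1.toList ab.2.toList
      if k > m then k else m) = fun m ab => max m (pvLcp ab.1.toList ab.2.toList) := by
    funext m ab
    simp only []
    rcases Nat.lt_or_ge m (pvLcp ab.1.toList ab.2.toList) with h | h
    · rw [if_pos h, Nat.max_eq_right (le_of_lt h)]
    · rw [if_neg (by omega), Nat.max_eq_left h]
  set s := PySem.List.sorted ws (fun x => x) false with hs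
  rw [hstep, show (s.zip s.tail).foldl (fun m ab => max m (pvLcp ab.1.toList ab.2.toList)) 0
      = ((s.zip s.tail).map (fun ab => pvLcp ab.1.toList ab.2.toList)).foldl max 0 by
    rw [List.foldl_map]]
  apply Nat.le_antisymm
  · -- every adjacent lcp is at most pvM
    apply pv_foldl_max_le _ 0 _ (Nat.zero_le _)
    intro L hL
    rcases List.mem_map.mp hL with ⟨ab, hab, rfl⟩
    rcases Nat.eq_zero_or_pos (pvLcp ab.1.toList ab.2.toList) with h0 | h0
    · omega
    set L := pvLcp ab.1.toList ab.2.toList with hLdef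
    obtain ⟨a, b⟩ := ab
    have hmem := List.of_mem_zip hab
    have h1 : a ∈ ws := (PySem.List.mem_sorted ws _ false a).mp hmem.1
    set p := a.toList.take L with hpdef
    have hp1 : p <+: a.toList := List.take_prefix _ _
    have hp2 : p <+: b.toList := by
      rw [hpdef, pv_lcp_take_eq]
      exact List.take_prefix _ _
    have hocc : 1 < (pvOcc ws p).length := by
      rw [pv_occ_sorted, ← hs]
      have h2 := pv_two_le_filter (fun w => p.isPrefixOf w.toList) s
        ⟨(a, b), hab, List.isPrefixOf_iff_prefix.mpr hp1, List.isPrefixOf_iff_prefix.mpr hp2⟩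
      omega
    calc L ≤ pvK ws a a.toList.length :=
            pv_le_K ws a _ L (pv_lcp_le_left _ _) hocc
      _ ≤ pvM ws := pv_K_le_M ws a h1
  · -- pvM is attained by some adjacent pair
    rcases Nat.eq_zero_or_pos (pvM ws) with h0 | h0
    · omega
    obtain ⟨w, hw, hK⟩ := pv_M_mem ws (by omega)
    set p := w.toList.take (pvM ws) with hpdef
    have hpl : p.length = pvM ws := by
      rw [hpdef, List.length_take, Nat.min_eq_left]
      rw [← hK]
      exact pv_K_le ws w _
    have hocc : 1 < (pvOcc ws p).length := by
      rw [hpdef, ← hK]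
      exact pv_K_spec ws w _ (by omega)
    have hconv : ∀ x y z : String, x ≤ y → y ≤ z →
        (fun w => p.isPrefixOf w.toList) x = true → (fun w => p.isPrefixOf w.toList) z = true →
        (fun w => p.isPrefixOf w.toList) y = true := by
      intro x y z hxy hyz hx hz
      simp only [List.isPrefixOf_iff_prefix] at *
      exact pv_lex_sandwich p x.toList y.toList z.toList
        (String.le_iff_toList_le.mp hxy) (String.le_iff_toList_le.mp hyz) hx hz
    have hlen : 2 ≤ (s.filter (fun w => p.isPrefixOf w.toList)).length := by
      rw [hs, ← pv_occ_sorted]; omega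
    obtain ⟨ab, hab, hq1, hq2⟩ := pv_adj_of_two_le_filter _ hconv s
      (PySem.List.sorted_pairwise ws (fun x => x)) hlen
    have hlcp : pvM ws ≤ pvLcp ab.1.toList ab.2.toList := by
      rw [← hpl]
      exact pv_lcp_ge p _ _ (List.isPrefixOf_iff_prefix.mp hq1)
        (List.isPrefixOf_iff_prefix.mp hq2)
    exact le_trans hlcp ((PySem.List.le_foldl_max _ 0).2 _
      (List.mem_map_of_mem hab))

-- k(w) reaching the global max is exactly B's search test
lemma pv_K_eq_M_iff (ws : List String) (w : String) (hw : w ∈ ws) (hM : 0 < pvM ws) :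
    pvK ws w w.toList.length = pvM ws
      ↔ (pvM ws ≤ w.toList.length ∧ 2 ≤ (pvOcc ws (w.toList.take (pvM ws))).length) := by
  constructor
  · intro h
    refine ⟨h ▸ pv_K_le ws w _, ?_⟩
    have := pv_K_spec ws w w.toList.length (by omega)
    rw [h] at this
    omega
  · rintro ⟨h1, h2⟩
    have hge := pv_le_K ws w w.toList.length (pvM ws) h1 (by omega)
    have hle := pv_K_le_M ws w hw
    omega

-- if m ≤ |w|, B's mates list is exactly pvOcc of the m-prefix of w
lemma pv_mates_eq (ws : List String) (w : String) (m : Nat) (hm : m ≤ w.toList.length) :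
    ws.filter (fun x =>
        PySem.List.slice x.toList none (some (m : Int)) = PySem.List.slice w.toList none (some (m : Int)))
      = pvOcc ws (w.toList.take m) := by
  unfold pvOcc
  apply List.filter_congr
  intro x _
  simp only [PySem.List.slice_to_natCast]
  rw [Bool.eq_iff_iff]
  simp only [decide_eq_true_eq, List.isPrefixOf_iff_prefix]
  rw [List.prefix_iff_eq_take, show (w.toList.take m).length = m by
    rw [List.length_take]; omega]
  exact ⟨fun h => h.symm, fun h => h.symm⟩

-- pvFind unfolded one step, with the let written out
lemma pv_find_cons (ws : List String) (m : Nat) (w : String) (rest : List String) :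
    pvFind ws m (w :: rest)
      = if m ≤ w.toList.length then
          (if 2 ≤ (ws.filter (fun x =>
              PySem.List.slice x.toList none (some (m : Int))
                = PySem.List.slice w.toList none (some (m : Int)))).length
           then (w, (PySem.List.pyGet? (ws.filter (fun x =>
              PySem.List.slice x.toList none (some (m : Int))
                = PySem.List.slice w.toList none (some (m : Int)))) 1).getD "")
           else pvFind ws m rest)
        else pvFind ws m rest := rfl

-- once the accumulator has reached every remaining k, the fold is constant
lemma pv_fold_const (ws : List String) : ∀ (ws' : List String) (st : Int × (String × String)),
    (∀ w ∈ ws', (pvK ws w w.toList.length : Int) ≤ st.1) →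
    ws'.foldl (fun st w => pvF ws st w w.toList.length) st = st := by
  intro ws'
  induction ws' with
  | nil => intro st _; rfl
  | cons w ws' ih =>
    intro st h
    rw [List.foldl_cons, show pvF ws st w w.toList.length = st by
      unfold pvF
      rw [if_neg (by have := h w List.mem_cons_self; omega)]]
    exact ih st (fun w' hw' => h w' (List.mem_cons_of_mem _ hw'))

-- the fold of pvF is B's first-hit search, as long as the max is still ahead
lemma pv_fold_eq_find (ws : List String) (hM : 0 < pvM ws) :
    ∀ (ws' : List String) (st : Int × (String × String)), 0 ≤ st.1 → st.1 < (pvM ws : Int) →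
    (∀ w ∈ ws', w ∈ ws) →
    (∃ w ∈ ws', pvK ws w w.toList.length = pvM ws) →
    (ws'.foldl (fun st w => pvF ws st w w.toList.length) st).2 = pvFind ws (pvM ws) ws' := by
  intro ws'
  induction ws' with
  | nil => rintro st _ _ _ ⟨w, hw, _⟩; simp at hw
  | cons w ws' ih =>
    intro st h0 hlt hsub hex
    rw [List.foldl_cons]
    by_cases hK : pvK ws w w.toList.length = pvM ws
    · -- w is the first hit: the fold updates to the final value and stays there
      obtain ⟨hm1, hm2⟩ := (pv_K_eq_M_iff ws w (hsub w List.mem_cons_self) hM).mp hK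
      have hstep : pvF ws st w w.toList.length
          = ((pvM ws : Int), (w, pvSec ws (w.toList.take (pvM ws)))) := by
        unfold pvF
        rw [hK, if_pos hlt]
      rw [hstep, pv_fold_const ws ws' _ (by
        intro w' hw'
        have := pv_K_le_M ws w' (hsub w' (List.mem_cons_of_mem _ hw'))
        simp only []
        omega)]
      rw [pv_find_cons, if_pos hm1, pv_mates_eq ws w (pvM ws) hm1, if_pos hm2]
      rfl
    · -- w is not a hit: neither side selects it
      have hKle : pvK ws w w.toList.length ≤ pvM ws := pv_K_le_M ws w (hsub w List.mem_cons_self)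
      have hnot : ¬ (pvM ws ≤ w.toList.length ∧ 2 ≤ (pvOcc ws (w.toList.take (pvM ws))).length) :=
        fun h => hK ((pv_K_eq_M_iff ws w (hsub w List.mem_cons_self) hM).mpr h)
      have hst' : (pvF ws st w w.toList.length).1 < (pvM ws : Int) ∧
          0 ≤ (pvF ws st w w.toList.length).1 := by
        unfold pvF
        split
        · constructor
          · simp only []
            omega
          · positivity
        · exact ⟨hlt, h0⟩
      have hex' : ∃ w' ∈ ws', pvK ws w' w'.toList.length = pvM ws := by
        rcases hex with ⟨w', hw', he⟩
        rcases List.mem_cons.mp hw' with rfl | hw''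
        · exact absurd he hK
        · exact ⟨w', hw'', he⟩
      rw [ih _ hst'.2 hst'.1 (fun w' hw' => hsub w' (List.mem_cons_of_mem _ hw')) hex']
      rw [pv_find_cons]
      by_cases hm1 : pvM ws ≤ w.toList.length
      · rw [if_pos hm1, pv_mates_eq ws w (pvM ws) hm1,
          if_neg (fun h => hnot ⟨hm1, h⟩)]
      · rw [if_neg hm1]

-- ===== VERDICT (by name: the statement is the Claim_ definition above) =====
theorem find_similar_words_spec : Claim_equal_find_similar_words := by
  intro ws _
  unfold Spec_find_similar_words
  simp only [find_similar_words, find_similar_words_alt]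
  rw [PySem.List.slice_from_one, pv_mB_eq ws]
  rw [show ws.foldl (fun d w => (w.toList.foldl (pvStepA1 w) ([], d)).2) PySem.Dict.empty
      = pvBuildA ws from rfl]
  rw [pv_outerA ws ws ((0 : Int), ("", "")) (by norm_num)]
  by_cases hM : pvM ws = 0
  · rw [if_pos hM, pv_fold_const ws ws _ (by
      intro w hw
      have := pv_K_le_M ws w hw
      simp only []
      omega)]
  · rw [if_neg hM]
    exact pv_fold_eq_find ws (Nat.pos_of_ne_zero hM) ws ((0 : Int), ("", "")) (by norm_num)
      (by show (0 : Int) < _; exact_mod_cast Nat.pos_of_ne_zero hM) (fun w hw => hw)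
      (pv_M_mem ws hM)
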